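-- pv_equiv track=rewrite | github.com/PixelatedLagg/SienaCS | python/2015/2015-4.py | newNumber
-- ===== SOURCE A (Python) =====
-- def newNumber(s):
--     top = []
--     bottom = []
--     for c in str(s):
--         top.append(int(c))
--         bottom.append(int(c))
--     top = list(map(str, sorted(top)))
--     bottom = list(map(str, sorted(bottom, reverse=True)))
--     return abs(int(int(''.join(top)) - int(''.join(bottom))))
-- ===== SOURCE B (Python) =====
-- def newNumber(s):
--     counts = {}
--     for c in str(s):
--         d = int(c)
--         counts[d] = counts.get(d, 0) + 1
--     asc = ''.join(str(d) * counts.get(d, 0) for d in range(10))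
--     desc = ''.join(str(d) * counts.get(d, 0) for d in range(9, -1, -1))
--     return abs(int(asc) - int(desc))
-- ===== Notes on version B (the rewrite author's own statement) =====
-- stated objective: alternative
-- what changed: Replaces the two comparison sorts (sorted and sorted(reverse=True)) of the digit list by a single counting pass into a digit->count table and builds the ascending/descending digit strings bucket by bucket over the fixed ranges 0..9 and 9..0 (counting sort).
import Mathlib
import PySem

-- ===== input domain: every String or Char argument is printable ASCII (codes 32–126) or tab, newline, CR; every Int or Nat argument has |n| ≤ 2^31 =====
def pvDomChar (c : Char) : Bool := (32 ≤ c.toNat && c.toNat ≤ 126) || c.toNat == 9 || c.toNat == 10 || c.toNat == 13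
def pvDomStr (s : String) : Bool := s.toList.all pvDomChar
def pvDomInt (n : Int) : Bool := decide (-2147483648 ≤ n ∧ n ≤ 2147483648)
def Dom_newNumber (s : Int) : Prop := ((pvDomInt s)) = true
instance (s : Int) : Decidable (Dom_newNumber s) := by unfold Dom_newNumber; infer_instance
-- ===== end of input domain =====

-- B replaces A's two comparison sorts of the digit list by a single counting pass and
-- builds the ascending/descending digit strings bucket by bucket (counting sort);
-- objective: alternative.

-- ===== PORT A =====
-- str(s) iterated as its character list (toList_toStr); int(c) → PySem.Int.ofChars? [c],
-- whose `.getD 0` stands in for the ValueError Pre_newNumber excludes (it can fire only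
-- on the '-' of a negative s); ''.join of the one-digit strings is ported exactly as the
-- flatten of their character lists; int() of an int is the identity and is so ported.
def newNumber (s : Int) : Int :=
  let top := (PySem.Int.toChars s).foldl
      (fun acc c => acc ++ [(PySem.Int.ofChars? [c]).getD 0]) []
  let bottom := (PySem.Int.toChars s).foldl
      (fun acc c => acc ++ [(PySem.Int.ofChars? [c]).getD 0]) []
  let top' := (PySem.List.sorted top (fun x => x) false).map PySem.Int.toChars
  let bottom' := (PySem.List.sorted bottom (fun x => x) true).map PySem.Int.toChars
  |(PySem.Int.ofChars? top'.flatten).getD 0 - (PySem.Int.ofChars? bottom'.flatten).getD 0|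

-- ===== PORT B =====
-- counts[d] = counts.get(d, 0) + 1 is the counter idiom → Dict.modify d 0 (· + 1);
-- str(d) * counts.get(d, 0) → PySem.List.pyRepeat (toChars d) (counts.getD d 0);
-- the joining generator expressions are the two appending folds over range(10) / range(9,-1,-1).
def newNumber_alt (s : Int) : Int :=
  let counts := (PySem.Int.toChars s).foldl
      (fun d c => d.modify ((PySem.Int.ofChars? [c]).getD 0) 0 (· + 1)) PySem.Dict.empty
  let asc := (PySem.List.pyRange 0 10 1).foldl
      (fun acc d => acc ++ PySem.List.pyRepeat (PySem.Int.toChars d) (counts.getD d 0)) []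
  let desc := (PySem.List.pyRange 9 (-1) (-1)).foldl
      (fun acc d => acc ++ PySem.List.pyRepeat (PySem.Int.toChars d) (counts.getD d 0)) []
  |(PySem.Int.ofChars? asc).getD 0 - (PySem.Int.ofChars? desc).getD 0|

-- ===== PRECONDITION & SPEC =====
-- Pre_ excludes exactly the negative s: there str(s) starts with '-' and int('-') raises
-- ValueError in A (B raises the same way); A returns normally on every s ≥ 0.
def Pre_newNumber (s : Int) : Prop := 0 ≤ s
instance (s : Int) : Decidable (Pre_newNumber s) := by unfold Pre_newNumber; infer_instance
def pvWitness_newNumber : Int := 472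

def Spec_newNumber (s : Int) (out : Int) : Prop := out = newNumber_alt s
instance (s : Int) (out : Int) : Decidable (Spec_newNumber s out) := by unfold Spec_newNumber; infer_instance

-- ===== CLAIM (what is proved, stated in full; the proofs are below) =====
def Claim_equal_newNumber : Prop := ∀ (s : Int), Dom_newNumber s → Pre_newNumber s → Spec_newNumber s (newNumber s)

-- ===== LEMMAS AND PROOFS =====

lemma toDigitsCore_digits (fuel : Nat) : ∀ (n : Nat) (acc : List Char),
    (∀ c ∈ acc, ∃ k : Nat, k < 10 ∧ c = Nat.digitChar k) →
    ∀ c ∈ Nat.toDigitsCore 10 fuel n acc, ∃ k : Nat, k < 10 ∧ c = Nat.digitChar k := by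
  induction fuel with
  | zero => intro n acc hacc; simpa [Nat.toDigitsCore] using hacc
  | succ f ih =>
    intro n acc hacc
    have hd : ∀ c ∈ (Nat.digitChar (n % 10) :: acc), ∃ k : Nat, k < 10 ∧ c = Nat.digitChar k := by
      intro c hc
      rcases List.mem_cons.mp hc with h | h
      · exact ⟨n % 10, Nat.mod_lt _ (by norm_num), h⟩
      · exact hacc c h
    simp only [Nat.toDigitsCore]
    split
    · intro c hc; exact hd c hc
    · intro c hc; exact ih (n / 10) _ hd c hc

lemma digitChar_val (k : Nat) (hk : k < 10) :
    (PySem.Int.ofChars? [Nat.digitChar k]).getD 0 = (k : Int) ∧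
    PySem.Int.toChars (k : Int) = [Nat.digitChar k] := by
  interval_cases k <;> exact ⟨by decide, by decide⟩

lemma flat_count (L : List Int) (hnd : L.Nodup) (ds : List Int) (a : Int) :
    ((L.map (fun d => List.replicate (ds.count d) d)).flatten).count a
      = if a ∈ L then ds.count a else 0 := by
  induction L with
  | nil => simp
  | cons x t ih =>
    have hx : x ∉ t := (List.nodup_cons.mp hnd).1
    have ht := ih (List.nodup_cons.mp hnd).2
    simp only [List.map_cons, List.flatten_cons, List.count_append, List.count_replicate, ht,
      List.mem_cons]
    by_cases hax : a = x
    · subst hax; simp [hx]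
    · simp [hax, Ne.symm hax]

lemma flat_perm (L : List Int) (hnd : L.Nodup) (ds : List Int)
    (hsub : ∀ d ∈ ds, d ∈ L) :
    ((L.map (fun d => List.replicate (ds.count d) d)).flatten).Perm ds := by
  rw [List.perm_iff_count]
  intro a
  rw [flat_count L hnd ds a]
  by_cases ha : a ∈ L
  · simp [ha]
  · simp [ha, List.count_eq_zero.mpr (fun hmem => ha (hsub a hmem))]

lemma flat_pairwise_le (L : List Int) (hL : L.Pairwise (· < ·)) (c : Int → Nat) :
    ((L.map (fun d => List.replicate (c d) d)).flatten).Pairwise (· ≤ ·) := by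
  induction L with
  | nil => simp
  | cons x t ih =>
    have hx := (List.pairwise_cons.mp hL).1
    have ht := ih (List.pairwise_cons.mp hL).2
    simp only [List.map_cons, List.flatten_cons]
    rw [List.pairwise_append]
    refine ⟨List.pairwise_replicate.mpr (Or.inr le_rfl), ht, ?_⟩
    intro a ha b hb
    have hax : a = x := (List.eq_of_mem_replicate ha)
    obtain ⟨l, hl, hbl⟩ := List.mem_flatten.mp hb
    obtain ⟨d, hd, rfl⟩ := List.mem_map.mp hl
    have hbd : b = d := List.eq_of_mem_replicate hbl
    subst hax; subst hbd
    exact le_of_lt (hx _ hd)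

lemma flat_pairwise_ge (L : List Int) (hL : L.Pairwise (· > ·)) (c : Int → Nat) :
    ((L.map (fun d => List.replicate (c d) d)).flatten).Pairwise (· ≥ ·) := by
  induction L with
  | nil => simp
  | cons x t ih =>
    have hx := (List.pairwise_cons.mp hL).1
    have ht := ih (List.pairwise_cons.mp hL).2
    simp only [List.map_cons, List.flatten_cons]
    rw [List.pairwise_append]
    refine ⟨List.pairwise_replicate.mpr (Or.inr le_rfl), ht, ?_⟩
    intro a ha b hb
    have hax : a = x := (List.eq_of_mem_replicate ha)
    obtain ⟨l, hl, hbl⟩ := List.mem_flatten.mp hb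
    obtain ⟨d, hd, rfl⟩ := List.mem_map.mp hl
    have hbd : b = d := List.eq_of_mem_replicate hbl
    subst hax; subst hbd
    exact le_of_lt (hx _ hd)

lemma flatten_replicate_singleton {α : Type} (m : Nat) (a : α) :
    (List.replicate m ([a] : List α)).flatten = List.replicate m a := by
  induction m with
  | zero => simp
  | succ k ih => simp [List.replicate_succ, ih]

lemma chars_eq (L : List Int) (cnt : Int → Nat)
    (hL : ∀ d ∈ L, ∃ ch, PySem.Int.toChars d = [ch]) :
    (((L.map (fun d => List.replicate (cnt d) d)).flatten).map PySem.Int.toChars).flatten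
      = L.flatMap (fun d => PySem.List.pyRepeat (PySem.Int.toChars d) ((cnt d : Int))) := by
  induction L with
  | nil => simp
  | cons x t ih =>
    obtain ⟨ch, hch⟩ := hL x (by simp)
    have ht := ih (fun d hd => hL d (by simp [hd]))
    simp only [List.map_cons, List.flatten_cons, List.map_append, List.flatten_append,
      List.flatMap_cons, ht, List.map_replicate, hch]
    rw [PySem.List.pyRepeat_singleton, flatten_replicate_singleton]
    simp

-- ===== VERDICT (by name: the statement is the Claim_ definition above) =====
theorem newNumber_spec : Claim_equal_newNumber := by
  intro s _ hpre
  unfold Spec_newNumber newNumber newNumber_alt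
  have hneg : ¬ (s < 0) := not_lt.mpr hpre
  -- characters of str(s) are decimal digit characters
  have Hc : ∀ c ∈ PySem.Int.toChars s, ∃ k : Nat, k < 10 ∧ c = Nat.digitChar k := by
    intro c hc
    rw [PySem.Int.toChars, if_neg hneg] at hc
    exact toDigitsCore_digits _ _ [] (by simp) c hc
  set dval : Char → Int := fun c => (PySem.Int.ofChars? [c]).getD 0 with hdval
  set ds : List Int := (PySem.Int.toChars s).map dval with hds
  have Hds : ∀ d ∈ ds, ∃ k : Nat, k < 10 ∧ d = (k : Int) := by
    intro d hd
    obtain ⟨c, hc, rfl⟩ := List.mem_map.mp hd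
    obtain ⟨k, hk, rfl⟩ := Hc c hc
    exact ⟨k, hk, (digitChar_val k hk).1⟩
  -- A's digit list
  rw [PySem.List.foldl_append_singleton_eq_map]
  -- B's counter
  have hcnt : ∀ d : Int,
      (((PySem.Int.toChars s).foldl
        (fun d c => d.modify ((PySem.Int.ofChars? [c]).getD 0) 0 (· + 1))
        PySem.Dict.empty).getD d 0) = (ds.count d : Int) := by
    intro d
    rw [hds, ← List.foldl_map (f := dval)
      (g := fun d x => PySem.Dict.modify d x 0 (· + 1))]
    rw [PySem.Dict.getD_foldl_modify_add_one]
    simp [PySem.Dict.empty, PySem.Dict.getD, PySem.Dict.get?]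
  simp only [hcnt, List.nil_append]
  have hr1 : PySem.List.pyRange 0 10 1 = ([0,1,2,3,4,5,6,7,8,9] : List Int) := by decide
  have hr2 : PySem.List.pyRange 9 (-1) (-1) = ([9,8,7,6,5,4,3,2,1,0] : List Int) := by decide
  rw [hr1, hr2, PySem.List.foldl_append_eq_flatMap, PySem.List.foldl_append_eq_flatMap]
  have hsub1 : ∀ d ∈ ds, d ∈ ([0,1,2,3,4,5,6,7,8,9] : List Int) := by
    intro d hd
    obtain ⟨k, hk, rfl⟩ := Hds d hd
    interval_cases k <;> decide
  have hsub2 : ∀ d ∈ ds, d ∈ ([9,8,7,6,5,4,3,2,1,0] : List Int) := by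
    intro d hd
    obtain ⟨k, hk, rfl⟩ := Hds d hd
    interval_cases k <;> decide
  have hasc : PySem.List.sorted ds (fun x => x) false
      = (([0,1,2,3,4,5,6,7,8,9] : List Int).map (fun d => List.replicate (ds.count d) d)).flatten :=
    PySem.List.sorted_id_eq_of_perm_of_pairwise _ _
      (flat_perm _ (by decide) ds hsub1) (flat_pairwise_le _ (by decide) _)
  have hdesc : PySem.List.sorted ds (fun x => x) true
      = (([9,8,7,6,5,4,3,2,1,0] : List Int).map (fun d => List.replicate (ds.count d) d)).flatten := by
    apply PySem.List.eq_of_perm_of_pairwise_le_of_injective (key := fun x : Int => -x) neg_injective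
    · exact (PySem.List.sorted_perm ds _ true).trans (flat_perm _ (by decide) ds hsub2).symm
    · exact (PySem.List.sorted_pairwise_rev ds _).imp (fun h => by simpa using h)
    · exact (flat_pairwise_ge _ (by decide) _).imp (fun h => by simpa using h)
  rw [hasc, hdesc, chars_eq _ _ (by intro d hd; fin_cases hd <;> exact ⟨_, rfl⟩),
    chars_eq _ _ (by intro d hd; fin_cases hd <;> exact ⟨_, rfl⟩)]
  rfl
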